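-- pv_equiv track=rewrite | github.com/LampSteven17/HillCipher-Python | hillCipher.py | charsToNums
-- ===== SOURCE A (Python) =====
-- def charsToNums(txt):
--     numArr = []
--     numsFormat = []
--     for i in txt:
--         for j in [char for char in (''.join(i))]:
--             numArr.append(ord(j)-96)
--
--     for i in range(0,len(numArr),2):
--         try:
--             numsFormat.append([numArr[i],numArr[i+1]])
--         except IndexError:
--             numsFormat.append([numArr[i],numArr[i]])
--
--
--     return numsFormat
-- ===== SOURCE B (Python) =====
-- def charsToNums(txt):
--     numsFormat = []
--     first = None
--     for s in txt:
--         for c in s: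
--             n = ord(c) - 96
--             if first is None:
--                 first = n
--             else:
--                 numsFormat.append([first, n])
--                 first = None
--     if first is not None:
--         numsFormat.append([first, first])
--     return numsFormat
-- ===== Notes on version B (the rewrite author's own statement) =====
-- stated objective: simpler
-- what changed: B fuses A's two passes (build the full number list, then regroup it by index with try/except) into one streaming loop over the characters with a one-slot pending buffer, duplicating the pending value at the end for an odd count.
import Mathlib
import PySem

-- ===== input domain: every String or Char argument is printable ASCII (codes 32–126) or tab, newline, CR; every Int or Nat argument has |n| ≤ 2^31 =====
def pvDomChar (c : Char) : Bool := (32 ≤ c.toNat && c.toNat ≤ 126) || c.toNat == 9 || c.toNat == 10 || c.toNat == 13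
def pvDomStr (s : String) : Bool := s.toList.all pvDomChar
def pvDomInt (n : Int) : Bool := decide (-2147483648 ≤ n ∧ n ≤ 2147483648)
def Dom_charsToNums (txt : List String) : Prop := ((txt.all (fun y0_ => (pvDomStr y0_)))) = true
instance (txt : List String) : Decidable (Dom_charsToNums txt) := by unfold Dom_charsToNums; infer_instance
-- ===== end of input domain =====

-- B fuses A's two passes (flatten to numbers, then regroup by index) into one
-- streaming loop with a one-slot pending buffer; objective: simpler, same cost.

-- ===== PORT A =====
-- for i in txt: for j in [char for char in ''.join(i)]: numArr.append(ord(j)-96)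
def pvNumArr (txt : List String) : List Int :=
  txt.foldl (fun acc s => s.toList.foldl (fun a j => a ++ [(j.toNat : Int) - 96]) acc) []

-- for i in range(0,len,2): try append [a[i],a[i+1]] except IndexError append [a[i],a[i]]
-- (the 'none, _' branch is unreachable: every i from the range is a valid index)
def pvRegroup (a : List Int) (acc : List (List Int)) : List (List Int) :=
  (PySem.List.pyRange 0 (a.length : Int) 2).foldl
    (fun acc i =>
      match PySem.List.pyGet? a i, PySem.List.pyGet? a (i + 1) with
      | some x, some y => acc ++ [[x, y]]
      | some x, none   => acc ++ [[x, x]]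
      | none, _        => acc) acc

def charsToNums (txt : List String) : List (List Int) :=
  pvRegroup (pvNumArr txt) []

-- ===== PORT B =====
-- one step of the streaming loop: state = (pending first value, output so far)
def pvStep (st : Option Int × List (List Int)) (n : Int) : Option Int × List (List Int) :=
  match st.1 with
  | none       => (some n, st.2)
  | some first => (none, st.2 ++ [[first, n]])

def charsToNums_alt (txt : List String) : List (List Int) :=
  let st := txt.foldl
    (fun st s => s.toList.foldl (fun st c => pvStep st ((c.toNat : Int) - 96)) st)
    (none, [])
  match st.1 with
  | some first => st.2 ++ [[first, first]]
  | none       => st.2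

-- ===== PRECONDITION & SPEC =====
def Spec_charsToNums (txt : List String) (out : List (List Int)) : Prop := out = charsToNums_alt txt
instance (txt : List String) (out : List (List Int)) : Decidable (Spec_charsToNums txt out) := by unfold Spec_charsToNums; infer_instance

-- ===== CLAIM (what is proved, stated in full; the proofs are below) =====
def Claim_equal_charsToNums : Prop := ∀ (txt : List String), Dom_charsToNums txt → Spec_charsToNums txt (charsToNums txt)

-- ===== LEMMAS AND PROOFS =====

-- the common reference: pair off a list of numbers, duplicating a leftover last one
def pvPairs : List Int → List (List Int)
  | [] => []
  | [x] => [[x, x]]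
  | x :: y :: r => [x, y] :: pvPairs r

lemma pvGet_cons_succ {α : Type} (x : α) (l : List α) (i : Int) (hi : 0 ≤ i) :
    PySem.List.pyGet? (x :: l) (i + 1) = PySem.List.pyGet? l i := by
  obtain ⟨n, rfl⟩ := Int.eq_ofNat_of_zero_le hi
  have : ((n : Int) + 1) = ((n + 1 : Nat) : Int) := by push_cast; ring
  rw [this, PySem.List.pyGet?_natCast, PySem.List.pyGet?_natCast]
  simp

lemma pvRange2_cons (n : Nat) :
    PySem.List.pyRange 0 ((n : Int) + 2) 2 =
      0 :: (PySem.List.pyRange 0 (n : Int) 2).map (· + 2) := by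
  rw [PySem.List.pyRange_of_pos 0 ((n : Int) + 2) (by norm_num),
      PySem.List.pyRange_of_pos 0 (n : Int) (by norm_num)]
  have h2 : (0 : Int) < (n : Int) + 2 := by positivity
  rw [if_pos h2]
  have hA : (((n : Int) + 2 - 0 + 2 - 1) / 2).toNat =
      (if (0 : Int) < (n : Int) then (((n : Int) - 0 + 2 - 1) / 2).toNat else 0) + 1 := by
    split <;> omega
  rw [hA, List.range_succ_eq_map, List.map_cons, List.map_map]
  refine congrArg₂ _ (by norm_num) ?_
  rw [List.map_map]
  apply List.map_congr_left
  intro k _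
  simp only [Function.comp]
  push_cast
  ring

lemma pvRegroup_eq_pairs (a : List Int) (acc : List (List Int)) :
    pvRegroup a acc = acc ++ pvPairs a := by
  induction a using pvPairs.induct generalizing acc with
  | case1 =>
      simp [pvRegroup, pvPairs, PySem.List.pyRange_of_pos]
  | case2 x =>
      have hlen : (([x] : List Int).length : Int) = 1 := by simp
      have hr : PySem.List.pyRange 0 (1 : Int) 2 = [0] := by decide
      have g0 : PySem.List.pyGet? [x] 0 = some x := by
        simp
      have g1 : PySem.List.pyGet? [x] 1 = none := by
        simpa using PySem.List.pyGet?_natCast [x] 1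
      simp only [pvRegroup, hlen, hr, List.foldl_cons, List.foldl_nil]
      norm_num [g0, g1, pvPairs]
  | case3 x y r ih =>
      have hlen : ((x :: y :: r).length : Int) = (r.length : Int) + 2 := by
        simp
        ring
      simp only [pvRegroup] at *
      rw [hlen, pvRange2_cons, List.foldl_cons]
      have g0 : PySem.List.pyGet? (x :: y :: r) (0 : Int) = some x := by
        simp
      have g1 : PySem.List.pyGet? (x :: y :: r) ((0 : Int) + 1) = some y := by
        simp
      rw [List.foldl_map]
      rw [PySem.List.foldl_congr_mem _ _
        (fun acc i =>
          match PySem.List.pyGet? r i, PySem.List.pyGet? r (i + 1) with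
          | some x, some y => acc ++ [[x, y]]
          | some x, none   => acc ++ [[x, x]]
          | none, _        => acc) _ ?_]
      · rw [g0, g1]
        simp only []
        rw [ih]
        simp [pvPairs]
      · intro acc' i hi
        have hpos : 0 ≤ i := by
          rcases (PySem.List.mem_pyRange_iff_of_pos (by norm_num) i).1 hi with ⟨h1, _⟩
          exact h1
        have e1 : PySem.List.pyGet? (x :: y :: r) (i + 2) = PySem.List.pyGet? r i := by
          have : i + 2 = (i + 1) + 1 := by ring
          rw [this, pvGet_cons_succ x _ (i+1) (by omega), pvGet_cons_succ y _ i hpos]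
        have e2 : PySem.List.pyGet? (x :: y :: r) (i + 2 + 1) = PySem.List.pyGet? r (i + 1) := by
          have : i + 2 + 1 = ((i + 1) + 1) + 1 := by ring
          rw [this, pvGet_cons_succ x _ ((i+1)+1) (by omega), pvGet_cons_succ y _ (i+1) (by omega)]
        rw [e1, e2]

-- the streaming loop, run on a flat list of numbers starting from empty pending slot
lemma pvStream_eq_pairs (l : List Int) (out : List (List Int)) :
    (match (l.foldl pvStep (none, out)).1 with
     | some first => (l.foldl pvStep (none, out)).2 ++ [[first, first]]
     | none => (l.foldl pvStep (none, out)).2) = out ++ pvPairs l := by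
  induction l using pvPairs.induct generalizing out with
  | case1 => simp [pvPairs]
  | case2 x => simp [pvStep, pvPairs]
  | case3 x y r ih => simp [pvStep, pvPairs, ih]

lemma pvCharFold (cs : List Char) (a : List Int) :
    cs.foldl (fun a j => a ++ [(j.toNat : Int) - 96]) a
      = a ++ cs.map (fun c => (c.toNat : Int) - 96) := by
  induction cs generalizing a with
  | nil => simp
  | cons c cs ihc => simp [ihc]

-- A's first pass equals the flattened char list mapped to numbers
lemma pvNumArr_eq (txt : List String) :
    pvNumArr txt = (txt.flatMap (fun s => s.toList)).map (fun c => (c.toNat : Int) - 96) := by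
  suffices h : ∀ (init : List Int),
      txt.foldl (fun acc s => s.toList.foldl (fun a j => a ++ [(j.toNat : Int) - 96]) acc) init
        = init ++ (txt.flatMap (fun s => s.toList)).map (fun c => (c.toNat : Int) - 96) by
    exact (h []).trans (List.nil_append _)
  induction txt with
  | nil => simp
  | cons s rest ih =>
      intro init
      rw [List.foldl_cons, pvCharFold, ih, List.flatMap_cons, List.map_append, List.append_assoc]

-- B's double fold equals the single fold over the flattened mapped list
lemma pvAlt_flat (txt : List String) :
    txt.foldl (fun st s => s.toList.foldl (fun st c => pvStep st ((c.toNat : Int) - 96)) st)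
      ((none : Option Int), ([] : List (List Int)))
    = ((txt.flatMap (fun s => s.toList)).map (fun c => (c.toNat : Int) - 96)).foldl pvStep
        (none, []) := by
  suffices h : ∀ (st : Option Int × List (List Int)),
      txt.foldl (fun st s => s.toList.foldl (fun st c => pvStep st ((c.toNat : Int) - 96)) st) st
        = ((txt.flatMap (fun s => s.toList)).map (fun c => (c.toNat : Int) - 96)).foldl pvStep st by
    exact h _
  induction txt with
  | nil => simp
  | cons s rest ih =>
      intro st
      simp [List.foldl_map, ih, List.foldl_append]

-- ===== VERDICT (by name: the statement is the Claim_ definition above) =====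
theorem charsToNums_spec : Claim_equal_charsToNums := by
  intro txt _
  unfold Spec_charsToNums charsToNums charsToNums_alt
  rw [pvRegroup_eq_pairs, pvNumArr_eq, List.nil_append]
  simp only [pvAlt_flat]
  rw [pvStream_eq_pairs, List.nil_append]
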